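-- pv_equiv track=rewrite | github.com/raymag/xpbox | Scripts/Python/Anagrama/anagram.py | findAnagramsPrefix
-- ===== SOURCE A (Python) =====
-- def findAnagrams(word):
--     if len(word) <=1:
--         return word
--     else:
--         tmp = []
--         for perm in findAnagrams(word[1:]):
--             for i in range(len(word)):
--                 tmp.append(perm[:i] + word[0:1] + perm[i:])
--         return tmp
--
-- def findAnagramsPrefix(word, prefix):
-- 	if len(word) <=1:
-- 		if word == prefix:
-- 			return word
-- 		else:
-- 			return list()
-- 	else:
-- 		tmp = list()
-- 		for perm in findAnagrams(word[1:]):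
-- 			for i in range(len(word)):
-- 				anagram = perm[:i] + word[0:1] + perm[i:]
-- 				if anagram[:len(prefix)] == prefix:
-- 					tmp.append(anagram)
-- 		return tmp
-- ===== SOURCE B (Python) =====
-- def findAnagramsPrefix(word, prefix):
--     # Pre_ excludes len(word) <= 1 with word == prefix, where A returns a bare
--     # string instead of a list; B returns the natural singleton list there.
--     if len(word) <= 1:
--         return [word] if word == prefix else []
--     result = [word[-1]]
--     for c in reversed(word[:-1]):
--         result = [p[:i] + c + p[i:] for p in result for i in range(len(p) + 1)]
--     return [a for a in result if a[:len(prefix)] == prefix]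
-- ===== Notes on version B (the rewrite author's own statement) =====
-- stated objective: alternative
-- what changed: Replaced the recursive anagram helper with an iterative worklist that inserts the word's characters right-to-left into a growing list of permutations, filtering by the prefix once at the end instead of inside the generation loop.
-- outside the precondition, e.g. on findAnagramsPrefix('a', 'a'): A returns 'a', B returns ['a']
import Mathlib
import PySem

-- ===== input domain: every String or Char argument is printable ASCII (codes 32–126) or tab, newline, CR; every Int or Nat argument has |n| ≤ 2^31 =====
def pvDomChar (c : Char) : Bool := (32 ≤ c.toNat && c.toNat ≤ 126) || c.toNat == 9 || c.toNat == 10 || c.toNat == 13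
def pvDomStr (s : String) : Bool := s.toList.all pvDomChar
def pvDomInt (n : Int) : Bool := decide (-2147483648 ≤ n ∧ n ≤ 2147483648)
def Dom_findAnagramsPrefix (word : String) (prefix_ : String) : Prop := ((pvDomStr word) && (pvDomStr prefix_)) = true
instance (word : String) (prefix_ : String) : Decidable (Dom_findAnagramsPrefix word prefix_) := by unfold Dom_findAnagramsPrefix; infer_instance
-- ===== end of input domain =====

-- B replaces the recursive anagram helper by an iterative worklist (insert characters
-- right-to-left, filter once at the end); alternative decomposition, same cost.


-- ===== PORT A =====
-- Python strings are represented as List Char (PySem.Chars side); the string outputs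
-- are rebuilt with String.ofList at the end.
-- findAnagrams: in the base case Python returns the ≤1-char STRING itself; its only
-- use is being iterated over (yielding its characters), which is what the [] / [[c]]
-- results denote exactly.
def findAnagramsA : List Char → List (List Char)
  | [] => []
  | [c] => [[c]]
  | c :: d :: rest =>
      (findAnagramsA (d :: rest)).foldl
        (fun tmp perm =>
          (List.range (rest.length + 2)).foldl
            (fun tmp2 i => tmp2 ++ [perm.take i ++ [c] ++ perm.drop i]) tmp)
        []

def findAnagramsPrefix (word : String) (prefix_ : String) : List String :=
  let w := word.toList
  let p := prefix_.toList
  if w.length ≤ 1 then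
    -- Python returns the string `word` itself when word == prefix (excluded by Pre_)
    if w == p then [word] else []
  else
    ((findAnagramsA (w.drop 1)).foldl
      (fun tmp perm =>
        (List.range w.length).foldl
          (fun tmp2 i =>
            let anagram := perm.take i ++ w.take 1 ++ perm.drop i
            if anagram.take p.length == p then tmp2 ++ [anagram] else tmp2)
          tmp)
      []).map String.ofList

-- ===== PORT B =====
-- all insertions of c into perm, in position order (the list comprehension's inner loop)
def pvInsertAll (c : Char) (perm : List Char) : List (List Char) :=
  (List.range (perm.length + 1)).map (fun i => perm.take i ++ [c] ++ perm.drop i)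

def findAnagramsPrefix_alt (word : String) (prefix_ : String) : List String :=
  let w := word.toList
  let p := prefix_.toList
  if w.length ≤ 1 then
    if word == prefix_ then [word] else []
  else
    let result := (w.dropLast.reverse).foldl
      (fun res c => res.flatMap (pvInsertAll c)) [[w.getLast!]]
    (result.filter (fun a => a.take p.length == p)).map String.ofList

-- ===== PRECONDITION & SPEC =====
-- Pre_ excludes the inputs with len(word) <= 1 and word == prefix, where Python A
-- returns the bare STRING word instead of a list (a value outside the declared
-- list-of-strings type); B returns the natural singleton list [word] there.
def Pre_findAnagramsPrefix (word : String) (prefix_ : String) : Prop :=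
  ¬ (word.toList.length ≤ 1 ∧ word = prefix_)
instance (word : String) (prefix_ : String) : Decidable (Pre_findAnagramsPrefix word prefix_) := by unfold Pre_findAnagramsPrefix; infer_instance

def pvWitness_findAnagramsPrefix : String × String := ("ab", "b")

def Spec_findAnagramsPrefix (word : String) (prefix_ : String) (out : List String) : Prop := out = findAnagramsPrefix_alt word prefix_
instance (word : String) (prefix_ : String) (out : List String) : Decidable (Spec_findAnagramsPrefix word prefix_ out) := by unfold Spec_findAnagramsPrefix; infer_instance

-- ===== CLAIM (what is proved, stated in full; the proofs are below) =====
def Claim_equal_findAnagramsPrefix : Prop := ∀ (word : String) (prefix_ : String), Dom_findAnagramsPrefix word prefix_ → Pre_findAnagramsPrefix word prefix_ → Spec_findAnagramsPrefix word prefix_ (findAnagramsPrefix word prefix_)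

-- ===== LEMMAS AND PROOFS =====

-- a foldl whose body extends the accumulator (membership-local shape) is a flatMap
theorem foldl_ext_flatMap {α β : Type} (l : List α) (F : List β → α → List β)
    (g : α → List β) (h : ∀ (acc : List β), ∀ x ∈ l, F acc x = acc ++ g x) :
    ∀ (acc : List β), l.foldl F acc = acc ++ l.flatMap g := by
  induction l with
  | nil => intro acc; simp
  | cons x t ih =>
    intro acc
    rw [List.foldl_cons, h acc x (by simp),
        ih (fun a y hy => h a y (by simp [hy])) (acc ++ g x)]
    simp

-- A's recursive step, in flatMap form, for a nonempty tail
theorem findAnagramsA_cons (c : Char) (rest : List Char) (h : rest ≠ []) :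
    findAnagramsA (c :: rest) =
      (findAnagramsA rest).flatMap
        (fun perm => (List.range (rest.length + 1)).map
          (fun i => perm.take i ++ [c] ++ perm.drop i)) := by
  cases rest with
  | nil => exact absurd rfl h
  | cons d rest' =>
    show (findAnagramsA (d :: rest')).foldl _ [] = _
    rw [foldl_ext_flatMap (findAnagramsA (d :: rest'))
        (fun tmp (perm : List Char) =>
          (List.range (rest'.length + 2)).foldl
            (fun tmp2 i => tmp2 ++ [perm.take i ++ [c] ++ perm.drop i]) tmp)
        (fun (perm : List Char) => (List.range (rest'.length + 2)).map
          (fun i => perm.take i ++ [c] ++ perm.drop i))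
        (fun acc perm _ => PySem.List.foldl_append_singleton_eq_map _ _ _)]
    simp [List.length_cons]

-- every member of findAnagramsA w has w's length
theorem length_mem_findAnagramsA : ∀ (w : List Char), ∀ perm ∈ findAnagramsA w,
    perm.length = w.length := by
  intro w
  induction w with
  | nil => intro perm hp; simp [findAnagramsA] at hp
  | cons c rest ih =>
    intro perm hp
    cases rest with
    | nil => simp [findAnagramsA] at hp; simp [hp]
    | cons d rest' =>
      rw [findAnagramsA_cons c (d :: rest') (by simp)] at hp
      simp only [List.mem_flatMap, List.mem_map, List.mem_range] at hp
      obtain ⟨q, hq, i, _, rfl⟩ := hp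
      have := ih q hq
      simp [this]

-- under the length fact the insertion map is pvInsertAll
theorem findAnagramsA_cons' (c : Char) (rest : List Char) (h : rest ≠ []) :
    findAnagramsA (c :: rest) = (findAnagramsA rest).flatMap (pvInsertAll c) := by
  rw [findAnagramsA_cons c rest h]
  apply List.flatMap_congr
  intro perm hp
  rw [pvInsertAll, length_mem_findAnagramsA rest perm hp]

-- B's worklist loop computes A's recursive helper
theorem buildB_eq : ∀ (w : List Char), w ≠ [] →
    (w.dropLast.reverse).foldl (fun res c => res.flatMap (pvInsertAll c)) [[w.getLast!]]
      = findAnagramsA w := by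
  intro w
  induction w with
  | nil => intro h; exact absurd rfl h
  | cons c rest ih =>
    intro _
    cases rest with
    | nil => simp [findAnagramsA]
    | cons d rest' =>
      have hne : (d :: rest') ≠ [] := by simp
      have hlast : (c :: d :: rest').getLast! = (d :: rest').getLast! := rfl
      rw [List.dropLast_cons_of_ne_nil hne, hlast, List.reverse_cons, List.foldl_append]
      simp only [List.foldl_cons, List.foldl_nil]
      rw [ih hne, findAnagramsA_cons' c (d :: rest') hne]

-- A's filtered double loop, as filter-of-flatMap
theorem foldA_filter (perms : List (List Char)) (n : Nat) (p : List Char)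
    (f : List Char → Nat → List Char) :
    perms.foldl
      (fun tmp perm =>
        (List.range n).foldl
          (fun tmp2 i =>
            if (f perm i).take p.length == p then tmp2 ++ [f perm i] else tmp2)
          tmp) []
      = (perms.flatMap (fun perm => (List.range n).map (f perm))).filter
          (fun a => a.take p.length == p) := by
  rw [foldl_ext_flatMap perms
      (fun tmp perm =>
        (List.range n).foldl
          (fun tmp2 i =>
            if (f perm i).take p.length == p then tmp2 ++ [f perm i] else tmp2)
          tmp)
      (fun perm => ((List.range n).map (f perm)).filter (fun a => a.take p.length == p))
      (by
        intro acc perm _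
        show (List.range n).foldl
            (fun tmp2 i =>
              if (f perm i).take p.length == p then tmp2 ++ [f perm i] else tmp2) acc
          = acc ++ ((List.range n).map (f perm)).filter (fun a => a.take p.length == p)
        rw [PySem.List.foldl_append_if (fun i => (f perm i).take p.length == p) (f perm)
            (l := List.range n) (acc := acc)]
        rw [List.filter_map]
        rfl)]
  rw [List.filter_flatMap]
  rfl

-- ===== VERDICT (by name: the statement is the Claim_ definition above) =====
theorem findAnagramsPrefix_spec : Claim_equal_findAnagramsPrefix := by
  intro word prefix_ _ hpre
  unfold Spec_findAnagramsPrefix findAnagramsPrefix findAnagramsPrefix_alt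
  by_cases hlen : word.toList.length ≤ 1
  · rw [if_pos hlen, if_pos hlen]
    have hne : word ≠ prefix_ := fun h' => hpre ⟨hlen, h'⟩
    rw [if_neg (by simp only [beq_iff_eq]; exact fun h => hne (String.toList_inj.mp h)),
        if_neg (by simp only [beq_iff_eq]; exact hne)]
  · rw [if_neg hlen, if_neg hlen]
    have hw : word.toList ≠ [] := by intro h; rw [h] at hlen; simp at hlen
    obtain ⟨c, rest, hcr⟩ := List.exists_cons_of_ne_nil hw
    have hrest : rest ≠ [] := by intro h; rw [hcr, h] at hlen; simp at hlen
    rw [foldA_filter, buildB_eq word.toList hw]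
    congr 1
    rw [hcr, findAnagramsA_cons' c rest hrest]
    simp only [List.drop_one, List.tail_cons]
    congr 1
    apply List.flatMap_congr
    intro perm hp
    have hl := length_mem_findAnagramsA rest perm hp
    simp [pvInsertAll, hl, List.length_cons]
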